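-- pv_equiv track=rewrite | github.com/Hwa-Jong/Programmers | Level2/Create_Large_Number.py | solution
-- ===== SOURCE A (Python) =====
-- def solution(number, k):
--     if len(number) == 1:
--         return ''
--
--     number = list(number)
--     number.reverse()
--     s = []
--     while k > 0:
--         s.append(number.pop())
--
--         if len(number) <= 0:
--             break
--
--         if s[-1] >= number[-1]:
--             continue
--         else: #s[-1] < number[-1]:
--             while s[-1] < number[-1]:
--                 s.pop()
--                 k -= 1
--                 if k <= 0 or len(s) <= 0:
--                     break
--
--     if k != 0:
--         s = s[:len(s)-k]
--
--     if len(s) > 0: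
--         s.reverse()
--         number = number + s
--
--     number.reverse()
--     return ''.join(number)
-- ===== SOURCE B (Python) =====
-- def remove_one(s):
--     for i in range(len(s) - 1):
--         if s[i] < s[i + 1]:
--             return s[:i] + s[i + 1:]
--     return s[:-1]
--
-- def solution(number, k):
--     if len(number) == 1:
--         return ''
--     if k <= 0:
--         return number
--     s = number
--     for _ in range(k):
--         if not s:
--             break
--         s = remove_one(s)
--     return s
-- ===== Notes on version B (the rewrite author's own statement) =====
-- stated objective: simpler
-- what changed: Replaces the single-pass reversed-list monotonic stack with budget bookkeeping and leftover trimming by k passes that each delete the first character that is smaller than its successor (or the last character if none), which is plainly shorter and needs no stack or slice arithmetic.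
-- intended difference: When k exceeds len(number) (a case the original problem never poses), A's trailing trim s[:len(s)-k] gets a negative bound and returns leftover stack characters whenever the string has more weak suffix-maxima than k-len(number) (e.g. A('21',3)='2'), while B simply deletes every character and returns '', the intended value when asked to remove at least as many digits as exist. — e.g. on solution("21", 3): A returns "2", B returns ""
import Mathlib
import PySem

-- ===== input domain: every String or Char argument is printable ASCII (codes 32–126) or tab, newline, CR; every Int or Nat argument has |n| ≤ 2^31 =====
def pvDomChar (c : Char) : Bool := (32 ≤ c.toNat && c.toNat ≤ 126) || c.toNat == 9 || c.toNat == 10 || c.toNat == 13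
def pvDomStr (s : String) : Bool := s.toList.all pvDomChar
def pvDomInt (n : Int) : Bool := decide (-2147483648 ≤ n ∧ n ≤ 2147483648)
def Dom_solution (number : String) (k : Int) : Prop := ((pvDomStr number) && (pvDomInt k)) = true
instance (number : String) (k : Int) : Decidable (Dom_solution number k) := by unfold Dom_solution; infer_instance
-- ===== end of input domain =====

-- B replaces A's reversed-list monotonic stack (with budget bookkeeping and a
-- trailing trim) by k passes that each delete the first character smaller than
-- its successor; equivalence is about the return value (A mutates no caller data).

-- ===== PORT A =====
-- Python A reverses `number` into a list popped from the end; we model that list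
-- head-first (head = next char to pop), and the stack `s` top-first (head = s[-1]).

-- inner `while s[-1] < number[-1]` loop: pops from the stack, decrementing k,
-- breaking when k <= 0 or the stack empties.
def aInner (s : List Char) (d : Char) (k : Int) : List Char × Int :=
  match s with
  | [] => ([], k)      -- unreachable: the loop is entered with a nonempty stack
  | x :: xs =>
    if x < d then
      if k - 1 ≤ 0 ∨ xs = [] then (xs, k - 1) else aInner xs d (k - 1)
    else (x :: xs, k)

theorem aInner_len_le (s : List Char) (d : Char) (k : Int) :
    (aInner s d k).1.length ≤ s.length := by
  induction s generalizing k with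
  | nil => simp [aInner]
  | cons x xs ih =>
    simp only [aInner]
    split
    · split
      · simp
      · exact le_trans (ih _) (by simp)
    · simp

-- outer `while k > 0` loop over (number, s, k)
def aOuter (rem stk : List Char) (k : Int) : List Char × List Char × Int :=
  if 0 < k then
    match rem with
    | [] => ([], stk, k)          -- Python raises here (pop from []); excluded by Pre_
    | [c] => ([], c :: stk, k)    -- `if len(number) <= 0: break` after the append
    | c :: d :: t =>
      if d ≤ c then aOuter (d :: t) (c :: stk) k        -- s[-1] >= number[-1]: continue
      else
        let p := aInner (c :: stk) d k
        aOuter (d :: t) p.1 p.2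
  else (rem, stk, k)
termination_by 2 * rem.length + stk.length
decreasing_by
  · simp; omega
  · have := aInner_len_le (c :: stk) d k
    simp at this ⊢; omega

-- the code after the loop: trim `s[:len(s)-k]`, then append and reverse back
def aFinish (rem stk : List Char) (k : Int) : List Char :=
  let s := stk.reverse
  let s := if k ≠ 0 then PySem.List.slice s none (some ((s.length : Int) - k)) else s
  if s ≠ [] then s ++ rem else rem

def solution (number : String) (k : Int) : String :=
  let cs := number.toList
  if cs.length = 1 then "" else
  let r := aOuter cs [] k
  String.ofList (aFinish r.1 r.2.1 r.2.2)

-- ===== PORT B =====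
-- remove_one: delete the first character smaller than its successor, else the last
def rmB (s : List Char) : List Char :=
  match s with
  | [] => []
  | [_] => []
  | x :: y :: t => if x < y then y :: t else x :: rmB (y :: t)

-- `for _ in range(k): if not s: break; s = remove_one(s)`
def iterRm (s : List Char) (k : Int) : List Char :=
  if k ≤ 0 then s
  else if s = [] then s
  else iterRm (rmB s) (k - 1)
termination_by k.toNat
decreasing_by omega

def solution_alt (number : String) (k : Int) : String :=
  let cs := number.toList
  if cs.length = 1 then "" else
  if k ≤ 0 then number
  else String.ofList (iterRm cs k)

-- ===== PRECONDITION & SPEC =====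
-- Pre_ excludes only number = '' with k > 0, where A raises IndexError (pop from []).
def Pre_solution (number : String) (k : Int) : Prop := number ≠ "" ∨ k ≤ 0
instance (number : String) (k : Int) : Decidable (Pre_solution number k) := by
  unfold Pre_solution; infer_instance

def pvWitness_solution : String × Int := ("1924", 2)

-- number of weak suffix-maxima: positions whose character is ≥ every later character
def smc (s : List Char) : Nat :=
  match s with
  | [] => 0
  | c :: t => (if t.all (· ≤ c) then 1 else 0) + smc t

-- When k exceeds len(number) (a case the original problem never poses), A's trailing
-- trim s[:len(s)-k] gets a negative bound and returns leftover stack characters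
-- whenever the string has more weak suffix-maxima than k-len(number); B deletes every
-- character and returns '', the intended value when removing at least as many digits as exist.
def D_solution (number : String) (k : Int) : Prop :=
  (number.toList.length : Int) < k ∧ k - (number.toList.length : Int) < (smc number.toList : Int)
instance (number : String) (k : Int) : Decidable (D_solution number k) := by
  unfold D_solution; infer_instance

def Spec_solution (number : String) (k : Int) (out : String) : Prop :=
  ¬ D_solution number k → out = solution_alt number k
instance (number : String) (k : Int) (out : String) : Decidable (Spec_solution number k out) := by
  unfold Spec_solution; infer_instance

def pvDiffWitness_solution : String × Int := ("21", 3)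
def pvDiffWitnessOut_solution : String × String := ("2", "")

-- ===== CLAIM (what is proved, stated in full; the proofs are below) =====
def Claim_unchanged_solution : Prop := ∀ (number : String) (k : Int),
  Dom_solution number k → Pre_solution number k → Spec_solution number k (solution number k)
def Claim_changed_solution : Prop :=
  Dom_solution (pvDiffWitness_solution.1) (pvDiffWitness_solution.2) ∧
  Pre_solution (pvDiffWitness_solution.1) (pvDiffWitness_solution.2) ∧
  D_solution (pvDiffWitness_solution.1) (pvDiffWitness_solution.2) ∧
  solution (pvDiffWitness_solution.1) (pvDiffWitness_solution.2) = pvDiffWitnessOut_solution.1 ∧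
  solution_alt (pvDiffWitness_solution.1) (pvDiffWitness_solution.2) = pvDiffWitnessOut_solution.2 ∧
  pvDiffWitnessOut_solution.1 ≠ pvDiffWitnessOut_solution.2
def Claim_exact_solution : Prop := ∀ (number : String) (k : Int),
  Dom_solution number k → Pre_solution number k → D_solution number k →
  solution number k ≠ solution_alt number k
-- ===== LEMMAS AND PROOFS =====

-- output of a whole A-run state
def outT (t : List Char × List Char × Int) : List Char := aFinish t.1 t.2.1 t.2.2

-- non-increasing (input order) / non-decreasing (top-first stack order)
def NI (s : List Char) : Prop := List.IsChain (fun a b : Char => b ≤ a) s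
def ND (s : List Char) : Prop := List.IsChain (fun a b : Char => a ≤ b) s

theorem aFinish_eq (rem stk : List Char) (k : Int) :
    aFinish rem stk k =
      (if k ≠ 0 then
        PySem.List.slice stk.reverse none (some ((stk.reverse.length : Int) - k))
       else stk.reverse) ++ rem := by
  unfold aFinish
  split_ifs <;> simp_all

theorem aFinish_zero (rem stk : List Char) : aFinish rem stk 0 = stk.reverse ++ rem := by
  simp [aFinish_eq]

-- unfolding rules for the outer loop
theorem aOuter_nonpos (rem stk : List Char) (k : Int) (h : k ≤ 0) :
    aOuter rem stk k = (rem, stk, k) := by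
  unfold aOuter; rw [if_neg (not_lt.mpr h)]

theorem aOuter_nil (stk : List Char) (k : Int) (h : 0 < k) :
    aOuter [] stk k = ([], stk, k) := by
  unfold aOuter; rw [if_pos h]

theorem aOuter_single (c : Char) (stk : List Char) (k : Int) (h : 0 < k) :
    aOuter [c] stk k = ([], c :: stk, k) := by
  unfold aOuter; rw [if_pos h]

theorem aOuter_cont (c d : Char) (t stk : List Char) (k : Int) (h : 0 < k) (hdc : d ≤ c) :
    aOuter (c :: d :: t) stk k = aOuter (d :: t) (c :: stk) k := by
  conv_lhs => unfold aOuter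
  rw [if_pos h]
  simp [hdc]

theorem aOuter_asc (c d : Char) (t stk : List Char) (k : Int) (h : 0 < k) (hdc : ¬ d ≤ c) :
    aOuter (c :: d :: t) stk k
      = aOuter (d :: t) (aInner (c :: stk) d k).1 (aInner (c :: stk) d k).2 := by
  conv_lhs => unfold aOuter
  rw [if_pos h]
  simp [hdc]

-- with budget exactly 1, A removes exactly the first ascent (or the last char): rmB
theorem one_removal : ∀ (rem : List Char), rem ≠ [] → ∀ stk : List Char,
    outT (aOuter rem stk 1) = stk.reverse ++ rmB rem := by
  intro rem
  induction rem with
  | nil => intro h; exact absurd rfl h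
  | cons x rest ih =>
    intro _ stk
    match rest with
    | [] =>
      rw [aOuter_single x stk 1 one_pos]
      simp only [outT, rmB]
      norm_num [aFinish_eq, PySem.List.slice_to]
    | y :: t =>
      by_cases hxy : x < y
      · rw [aOuter_asc x y t stk 1 one_pos (not_le.mpr hxy)]
        have hin : aInner (x :: stk) y 1 = (stk, 0) := by
          simp [aInner, hxy]
        rw [hin]
        simp only [outT]
        rw [aOuter_nonpos _ _ _ le_rfl]
        simp [aFinish_zero, rmB, hxy]
      · rw [aOuter_cont x y t stk 1 one_pos (not_lt.mp hxy)]
        rw [ih (by simp) (x :: stk)]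
        simp [rmB, hxy]

-- rmB on a string whose first ascent is a < b deletes exactly a
theorem rmB_ascent : ∀ (P : List Char) (a b : Char) (T : List Char),
    NI (P ++ [a]) → a < b → rmB (P ++ a :: b :: T) = P ++ b :: T := by
  intro P
  induction P with
  | nil => intro a b T _ hab; simp [rmB, hab]
  | cons c P' ih =>
    intro a b T hch hab
    unfold NI at hch
    rw [List.cons_append, List.isChain_cons] at hch
    obtain ⟨hhead, htail⟩ := hch
    match hP' : P' with
    | [] =>
      have hca : a ≤ c := hhead a (by simp)
      simp only [List.cons_append, List.nil_append, rmB, if_neg (not_lt.mpr hca)]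
      simp [hab]
    | p2 :: P'' =>
      have hc : p2 ≤ c := hhead p2 (by simp)
      simp only [List.cons_append, rmB, if_neg (not_lt.mpr hc)]
      rw [← List.cons_append, ih a b T htail hab]
      simp

-- THE ASCENT LEMMA (core, budget ≥ 2): one unit of budget = deleting the first ascent
theorem outA_ascent_core : ∀ (P : List Char) (a b : Char) (T stk : List Char) (k : Int),
    2 ≤ k → NI (P ++ [a]) → a < b →
    (∀ x, stk.head? = some x → P.headD b ≤ x) →
    outT (aOuter (P ++ a :: b :: T) stk k) = outT (aOuter (P ++ b :: T) stk (k - 1)) := by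
  intro P
  induction P with
  | nil =>
    intro a b T stk k hk _ hab hstk
    have h0k : 0 < k := by omega
    rw [List.nil_append, List.nil_append]
    rw [aOuter_asc a b T stk k h0k (not_le.mpr hab)]
    have hin : aInner (a :: stk) b k = (stk, k - 1) := by
      simp only [aInner, if_pos hab]
      by_cases h1 : k - 1 ≤ 0 ∨ stk = []
      · rw [if_pos h1]
      · rw [if_neg h1]
        push_neg at h1
        obtain ⟨x, xs, hx⟩ := List.exists_cons_of_ne_nil h1.2
        subst hx
        have hbx : b ≤ x := hstk x (by simp)
        simp [aInner, not_lt.mpr hbx]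
    rw [hin]
  | cons c P' ih =>
    intro a b T stk k hk hch hab hstk
    have h0k : 0 < k := by omega
    have h0k1 : (0:Int) < k - 1 := by omega
    unfold NI at hch
    rw [List.cons_append, List.isChain_cons] at hch
    obtain ⟨hhead, htail⟩ := hch
    match hP' : P' with
    | [] =>
      have hca : a ≤ c := hhead a (by simp)
      simp only [List.cons_append, List.nil_append] at *
      rw [aOuter_cont c a (b :: T) stk k h0k hca]
      by_cases hbc : b ≤ c
      · rw [aOuter_cont c b T stk (k - 1) h0k1 hbc]
        have := ih a b T (c :: stk) k hk htail hab
          (by intro x hx; simp at hx; subst hx; exact hbc)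
        simpa using this
      · -- c < b : both sides run the same inner loop from (c :: stk) with budget k-1
        rw [aOuter_asc a b T (c :: stk) k h0k (not_le.mpr hab)]
        rw [aOuter_asc c b T stk (k - 1) h0k1 hbc]
        have hin : aInner (a :: c :: stk) b k = aInner (c :: stk) b (k - 1) := by
          simp only [aInner, if_pos hab]
          rw [if_neg (by push_neg; exact ⟨by omega, by simp⟩)]
        rw [hin]
    | p2 :: P'' =>
      have hc : p2 ≤ c := hhead p2 (by simp)
      simp only [List.cons_append] at *
      rw [aOuter_cont c p2 (P'' ++ a :: b :: T) stk k h0k hc]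
      rw [aOuter_cont c p2 (P'' ++ b :: T) stk (k - 1) h0k1 hc]
      exact ih a b T (c :: stk) k hk htail hab
        (by intro x hx; simp at hx; subst hx; exact hc)

theorem outA_ascent (P : List Char) (a b : Char) (T stk : List Char) (k : Int)
    (hk : 1 ≤ k) (hch : NI (P ++ [a])) (hab : a < b)
    (hstk : ∀ x, stk.head? = some x → P.headD b ≤ x) :
    outT (aOuter (P ++ a :: b :: T) stk k) = outT (aOuter (P ++ b :: T) stk (k - 1)) := by
  by_cases hk1 : k = 1
  · subst hk1
    rw [one_removal (P ++ a :: b :: T) (by simp) stk]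
    rw [rmB_ascent P a b T hch hab]
    norm_num [aOuter_nonpos _ _ _ (le_refl (0:Int)), outT, aFinish_zero]
  · exact outA_ascent_core P a b T stk k (by omega) hch hab hstk

theorem NI_single (x : Char) : NI [x] := List.isChain_singleton x

theorem pushall : ∀ (s : List Char), NI s → s ≠ [] → ∀ (stk : List Char) (k : Int), 0 < k →
    aOuter s stk k = ([], s.reverse ++ stk, k) := by
  intro s
  induction s with
  | nil => intro _ h; exact absurd rfl h
  | cons x rest ih =>
    intro hni _ stk k hk
    match rest with
    | [] => rw [aOuter_single x stk k hk]; simp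
    | y :: t =>
      unfold NI at hni
      rw [List.isChain_cons] at hni
      obtain ⟨hhead, htail⟩ := hni
      have hyx : y ≤ x := hhead y (by simp)
      rw [aOuter_cont x y t stk k hk hyx]
      rw [ih htail (by simp) (x :: stk) k hk]
      simp

theorem rmB_noninc : ∀ (s : List Char), NI s → rmB s = s.dropLast := by
  intro s
  induction s with
  | nil => intro _; rfl
  | cons x rest ih =>
    intro hni
    match rest with
    | [] => rfl
    | y :: t =>
      unfold NI at hni
      rw [List.isChain_cons] at hni
      obtain ⟨hhead, htail⟩ := hni
      have hyx : y ≤ x := hhead y (by simp)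
      simp only [rmB, if_neg (not_lt.mpr hyx)]
      rw [ih htail]
      rfl

theorem rmB_len : ∀ (s : List Char), s ≠ [] → (rmB s).length = s.length - 1 := by
  intro s
  induction s with
  | nil => intro h; exact absurd rfl h
  | cons x rest ih =>
    intro _
    match rest with
    | [] => rfl
    | y :: t =>
      by_cases hxy : x < y
      · simp [rmB, hxy]
      · simp only [rmB, if_neg hxy]
        have := ih (by simp)
        simp at this ⊢
        omega

theorem decomp : ∀ (s : List Char),
    NI s ∨ ∃ P a b T, s = P ++ a :: b :: T ∧ NI (P ++ [a]) ∧ a < b := by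
  intro s
  induction s with
  | nil => left; exact List.IsChain.nil
  | cons x rest ih =>
    rcases ih with hni | ⟨P, a, b, T, hs, hch, hab⟩
    · match rest with
      | [] => left; exact NI_single _
      | y :: t =>
        by_cases hxy : x < y
        · right; exact ⟨[], x, y, t, rfl, NI_single _, hxy⟩
        · left
          unfold NI
          rw [List.isChain_cons]
          exact ⟨by intro z hz; simp at hz; subst hz; exact not_lt.mp hxy, hni⟩
    · subst hs
      match P with
      | [] =>
        by_cases hxa : x < a
        · right; exact ⟨[], x, a, b :: T, rfl, NI_single _, hxa⟩
        · right
          refine ⟨[x], a, b, T, rfl, ?_, hab⟩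
          unfold NI
          rw [show ([x] : List Char) ++ [a] = x :: [a] from rfl, List.isChain_cons]
          exact ⟨by intro z hz; simp at hz; subst hz; exact not_lt.mp hxa,
                 NI_single _⟩
      | c :: P' =>
        by_cases hxc : x < c
        · right; exact ⟨[], x, c, P' ++ a :: b :: T, by simp, NI_single _, hxc⟩
        · right
          refine ⟨x :: c :: P', a, b, T, by simp, ?_, hab⟩
          unfold NI
          rw [List.cons_append, List.isChain_cons]
          exact ⟨by intro z hz; simp at hz; subst hz; exact not_lt.mp hxc, hch⟩

-- a non-increasing string just gets pushed and trimmed: its A-output is a take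
theorem outA_noninc (s : List Char) (hni : NI s) (hne : s ≠ []) (k : Int)
    (hk : 1 ≤ k) (hkn : k ≤ s.length) :
    outT (aOuter s [] k) = s.take (((s.length : Int) - k).toNat) := by
  rw [pushall s hni hne [] k (by omega)]
  simp only [outT, aFinish_eq]
  rw [if_pos (show k ≠ 0 by omega)]
  simp only [List.append_nil, List.reverse_reverse, List.length_reverse]
  rw [PySem.List.slice_to]
  omega

theorem noninc_red (s : List Char) (hni : NI s) (hne : s ≠ []) (k : Int)
    (hk : 1 ≤ k) (hkn : k ≤ s.length) :
    outT (aOuter s [] k) = outT (aOuter (rmB s) [] (k - 1)) := by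
  have hn1 : 1 ≤ s.length := List.length_pos_iff.mpr hne
  rw [outA_noninc s hni hne k hk hkn, rmB_noninc s hni]
  by_cases hk1 : k = 1
  · subst hk1
    rw [show (1:Int) - 1 = 0 by norm_num, aOuter_nonpos _ _ _ le_rfl]
    simp only [outT, aFinish_zero, List.reverse_nil, List.nil_append]
    rw [List.dropLast_eq_take]
    congr 1
    omega
  · have h2 : 2 ≤ k := by omega
    have hld : s.dropLast = s.take (s.length - 1) := List.dropLast_eq_take
    have hlen : (s.dropLast).length = s.length - 1 := by simp
    have hne' : s.dropLast ≠ [] := by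
      rw [← List.length_pos_iff, hlen]; omega
    have hni' : NI s.dropLast := by rw [hld]; exact hni.take _
    rw [outA_noninc _ hni' hne' (k - 1) (by omega) (by rw [hlen]; push_cast; omega), hlen]
    rw [hld, List.take_take]
    congr 1
    omega

theorem red (s : List Char) (k : Int) (hne : s ≠ []) (hk : 1 ≤ k) (hkn : k ≤ s.length) :
    outT (aOuter s [] k) = outT (aOuter (rmB s) [] (k - 1)) := by
  rcases decomp s with hni | ⟨P, a, b, T, hs, hch, hab⟩
  · exact noninc_red s hni hne k hk hkn
  · subst hs
    rw [rmB_ascent P a b T hch hab]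
    exact outA_ascent P a b T [] k hk hch hab (by intro x hx; simp at hx)

theorem iterRm_nonpos (s : List Char) (k : Int) (h : k ≤ 0) : iterRm s k = s := by
  unfold iterRm; rw [if_pos h]

theorem iterRm_nil (k : Int) : iterRm [] k = [] := by
  unfold iterRm; simp

theorem iterRm_step (s : List Char) (k : Int) (h : ¬ k ≤ 0) (hs : s ≠ []) :
    iterRm s k = iterRm (rmB s) (k - 1) := by
  conv_lhs => unfold iterRm
  rw [if_neg h, if_neg hs]

-- A equals B for every budget up to the length of the string
theorem mainA : ∀ (kn : Nat) (s : List Char), kn ≤ s.length →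
    outT (aOuter s [] (kn : Int)) = iterRm s (kn : Int) := by
  intro kn
  induction kn with
  | zero =>
    intro s _
    rw [Nat.cast_zero, aOuter_nonpos _ _ _ le_rfl, iterRm_nonpos _ _ le_rfl]
    simp [outT, aFinish_zero]
  | succ n ih =>
    intro s hlen
    have hne : s ≠ [] := by
      rw [← List.length_pos_iff]; omega
    rw [red s ((n + 1 : Nat) : Int) hne (by exact_mod_cast Nat.one_le_iff_ne_zero.mpr (by omega))
      (by exact_mod_cast hlen)]
    rw [iterRm_step s _ (by push_cast; omega) hne]
    have hcast : ((n + 1 : Nat) : Int) - 1 = (n : Int) := by push_cast; ring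
    rw [hcast]
    exact ih (rmB s) (by have := rmB_len s hne; omega)

-- ===== the k > len(number) regime =====

-- with budget larger than anything poppable, the inner loop is a plain dropWhile
theorem aInner_big : ∀ (s : List Char) (d : Char) (k : Int), (s.length : Int) < k →
    aInner s d k = (s.dropWhile (fun y => y < d),
                    k - s.length + (s.dropWhile (fun y => y < d)).length) := by
  intro s
  induction s with
  | nil => intro d k _; simp [aInner]
  | cons x xs ih =>
    intro d k hk
    simp only [List.length_cons] at hk
    push_cast at hk
    by_cases hxd : x < d
    · rw [List.dropWhile_cons_of_pos (by simpa using hxd)]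
      simp only [aInner, if_pos hxd]
      by_cases hxs : xs = []
      · subst hxs
        rw [if_pos (Or.inr rfl)]
        refine Prod.ext (by simp) (by simp; try omega)
      · rw [if_neg (by push_neg; exact ⟨by omega, hxs⟩)]
        rw [ih d (k - 1) (by omega)]
        refine Prod.ext rfl ?_
        simp only [List.length_cons]
        push_cast
        ring
    · rw [List.dropWhile_cons_of_neg (by simpa using hxd)]
      simp only [aInner, if_neg hxd]
      refine Prod.ext rfl ?_
      simp only [List.length_cons]
      push_cast
      ring

-- the stack after a full run with unbounded budget
def fsA : List Char → List Char → List Char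
  | [], stk => stk
  | [c], stk => c :: stk
  | c :: d :: t, stk =>
    if d ≤ c then fsA (d :: t) (c :: stk)
    else fsA (d :: t) ((c :: stk).dropWhile (fun y => y < d))

-- with k above the total size, the outer loop consumes everything, never
-- exhausting its budget; the final stack is fsA and the budget decreases by the pops
theorem bigk : ∀ (s stk : List Char) (k : Int), ((s.length + stk.length : Nat) : Int) < k →
    aOuter s stk k
      = ([], fsA s stk, k - ((s.length + stk.length : Nat) : Int) + ((fsA s stk).length : Int)) := by
  intro s
  induction s with
  | nil =>
    intro stk k hk
    rw [aOuter_nil stk k (by push_cast at hk; omega)]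
    refine Prod.ext rfl (Prod.ext (by simp [fsA]) (by simp [fsA]; try push_cast; try omega))
  | cons c rest ih =>
    intro stk k hk
    have h0k : 0 < k := by push_cast at hk; omega
    cases rest with
    | nil =>
      rw [aOuter_single c stk k h0k]
      refine Prod.ext rfl (Prod.ext (by simp [fsA]) (by simp [fsA]; try push_cast; try omega))
    | cons d t =>
      by_cases hdc : d ≤ c
      · rw [aOuter_cont c d t stk k h0k hdc]
        rw [ih (c :: stk) k (by try simp only [List.length_cons, List.length_nil] at hk ⊢; try push_cast at hk ⊢; omega)]
        refine Prod.ext rfl (Prod.ext (by simp [fsA, hdc]) ?_)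
        simp only [fsA, if_pos hdc, List.length_cons, List.length_nil]
        push_cast
        omega
      · rw [aOuter_asc c d t stk k h0k hdc]
        have hin := aInner_big (c :: stk) d k (by try simp only [List.length_cons, List.length_nil] at hk ⊢; try push_cast at hk ⊢; omega)
        rw [hin]
        set S := (c :: stk).dropWhile (fun y => y < d) with hS
        have hSlen : S.length ≤ stk.length + 1 := by
          have := List.length_dropWhile_le (fun y => y < d) (c :: stk)
          simpa using this
        rw [ih S (k - ((c :: stk).length : Int) + (S.length : Int)) (by try simp only [List.length_cons, List.length_nil] at hk ⊢; try push_cast at hk ⊢; omega)]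
        refine Prod.ext rfl (Prod.ext (by simp only [fsA, if_neg hdc, ← hS]) ?_)
        simp only [fsA, if_neg hdc, ← hS, List.length_cons, List.length_nil]
        push_cast
        omega

-- sorted-stack facts
theorem ND_all_ge (stk : List Char) (c : Char) (hnd : ND stk)
    (hh : ∀ x, stk.head? = some x → c ≤ x) : ∀ x ∈ stk, c ≤ x := by
  cases stk with
  | nil => intro x hx; simp at hx
  | cons h t =>
    have hp : List.Pairwise (fun a b : Char => a ≤ b) (h :: t) :=
      List.isChain_iff_pairwise.mp hnd
    rw [List.pairwise_cons] at hp
    have hch : c ≤ h := hh h rfl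
    intro x hx
    rcases List.mem_cons.mp hx with hx | hx
    · subst hx; exact hch
    · exact le_trans hch (hp.1 x hx)

theorem dropWhile_head_ge (stk : List Char) (d : Char) :
    ∀ x, (stk.dropWhile (fun y => y < d)).head? = some x → d ≤ x := by
  induction stk with
  | nil => intro x hx; simp at hx
  | cons h t ih =>
    by_cases hhd : h < d
    · rw [List.dropWhile_cons_of_pos (by simpa using hhd)]
      exact ih
    · rw [List.dropWhile_cons_of_neg (by simpa using hhd)]
      intro x hx
      simp at hx
      subst hx
      exact not_lt.mp hhd

-- the size of the fully-greedy stack is the number of weak suffix-maxima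
theorem fsA_smc : ∀ (rem stk : List Char), ND stk →
    (∀ c x, rem.head? = some c → stk.head? = some x → c ≤ x) →
    (fsA rem stk).length
      = smc rem + (stk.filter (fun x => rem.all (fun y => y ≤ x))).length := by
  intro rem
  induction rem with
  | nil => intro stk _ _; simp [fsA, smc]
  | cons c rest ih =>
    intro stk hnd hh
    have hcstk : ∀ x ∈ stk, c ≤ x :=
      ND_all_ge stk c hnd (fun x hx => hh c x rfl hx)
    cases rest with
    | nil =>
      have hfil : stk.filter (fun x => [c].all (fun y => y ≤ x)) = stk :=
        List.filter_eq_self.mpr (by intro x hx; simpa using hcstk x hx)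
      simp only [fsA, smc, hfil]
      simp [smc]
      omega
    | cons d t =>
      by_cases hdc : d ≤ c
      · simp only [fsA, if_pos hdc]
        have hnd' : ND (c :: stk) := by
          unfold ND at *
          rw [List.isChain_cons]
          exact ⟨by intro y hy; exact hh c y rfl hy, hnd⟩
        have ihres := ih (c :: stk) hnd'
          (by intro c' x hc' hx; simp at hc' hx; subst hc'; subst hx; exact hdc)
        rw [ihres, List.filter_cons]
        have hQP : stk.filter (fun x => (d :: t).all (fun y => y ≤ x))
            = stk.filter (fun x => (c :: d :: t).all (fun y => y ≤ x)) := by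
          apply List.filter_congr
          intro x hx
          simp [hcstk x hx]
        rw [hQP]
        simp only [smc]
        split_ifs <;> simp <;> omega
      · have hcd : c < d := not_le.mp hdc
        have halldF : ((d :: t).all (fun y => y ≤ c)) = false := by
          rw [List.all_eq_false]
          exact ⟨d, by simp, by simpa using not_le.mpr hcd⟩
        simp only [fsA, if_neg hdc]
        rw [List.dropWhile_cons_of_pos (by simpa using hcd)]
        set S := stk.dropWhile (fun y => y < d) with hS
        have hndS : ND S := hnd.suffix (List.dropWhile_suffix _)
        have ihres := ih S hndS
          (by intro c' x hc' hx; simp at hc'; subst hc'; exact dropWhile_head_ge stk d x hx)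
        rw [ihres]
        have hdS : ∀ x ∈ S, d ≤ x :=
          ND_all_ge S d hndS (fun x hx => dropWhile_head_ge stk d x hx)
        have h1 : (stk.takeWhile (fun y => y < d)).filter
            (fun x => (c :: d :: t).all (fun y => y ≤ x)) = [] := by
          apply List.filter_eq_nil_iff.mpr
          intro x hx
          have hxd : x < d := by simpa using List.mem_takeWhile_imp hx
          simp only [Bool.not_eq_true, List.all_eq_false]
          exact ⟨d, by simp, by simpa using not_le.mpr hxd⟩
        have hfilP : stk.filter (fun x => (c :: d :: t).all (fun y => y ≤ x))
            = S.filter (fun x => (d :: t).all (fun y => y ≤ x)) := by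
          conv_lhs => rw [← List.takeWhile_append_dropWhile (p := fun y => y < d) (l := stk)]
          rw [List.filter_append, ← hS, h1, List.nil_append]
          apply List.filter_congr
          intro x hx
          have hdx : d ≤ x := hdS x hx
          have hcx : c ≤ x := le_trans (le_of_lt hcd) hdx
          simp [hcx]
        rw [hfilP]
        simp only [smc, halldF]
        simp

theorem fsA_smc_nil (s : List Char) : (fsA s []).length = smc s := by
  have := fsA_smc s [] List.IsChain.nil (by intro c x _ hx; simp at hx)
  simpa using this

theorem smc_le_len : ∀ (s : List Char), smc s ≤ s.length := by
  intro s
  induction s with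
  | nil => simp [smc]
  | cons c t ih => simp only [smc]; split_ifs <;> simp <;> omega

-- A's output when the budget exceeds the length: leftover trimming with a negative bound
theorem outA_big (s : List Char) (k : Int) (hk : (s.length : Int) < k) :
    outT (aOuter s [] k)
      = (fsA s []).reverse.take ((fsA s []).length - (k - (s.length : Int)).toNat) := by
  rw [bigk s [] k (by simp only [List.length_nil, Nat.add_zero]; omega)]
  simp only [outT, aFinish_eq, List.length_nil, Nat.add_zero, List.length_reverse,
    List.append_nil]
  set F := fsA s [] with hF
  rw [if_pos (show k - (s.length : Int) + (F.length : Int) ≠ 0 by omega)]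
  have hb : (F.length : Int) - (k - (s.length : Int) + (F.length : Int))
      = -(((k - (s.length : Int)).toNat : Nat) : Int) := by omega
  rw [hb, PySem.List.slice_to_neg_natCast _ _ (by omega)]
  rw [List.length_reverse]

-- B's output when the budget reaches the length: everything is removed
theorem iterRm_all : ∀ (m : Nat) (s : List Char) (k : Int),
    s.length ≤ m → (s.length : Int) ≤ k → iterRm s k = [] := by
  intro m
  induction m with
  | zero =>
    intro s k h _
    have : s = [] := List.length_eq_zero_iff.mp (by omega)
    subst this
    exact iterRm_nil k
  | succ m ih =>
    intro s k hm hk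
    cases s with
    | nil => exact iterRm_nil k
    | cons x t =>
      rw [iterRm_step _ _ (by simp only [List.length_cons] at hk; omega) (by simp)]
      exact ih _ _ (by have := rmB_len (x :: t) (by simp); simp at this hm ⊢; omega)
        (by have h2 := rmB_len (x :: t) (by simp)
            simp only [List.length_cons] at h2 hk ⊢
            omega)

-- ===== VERDICT (by name: the statement is the Claim_ definition above) =====
theorem toList_ne_nil (number : String) (h : number ≠ "") : number.toList ≠ [] := by
  intro h0
  have h2 : String.ofList number.toList = String.ofList [] := by rw [h0]
  rw [String.ofList_toList] at h2
  exact h (h2.trans rfl)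

theorem solution_spec : Claim_unchanged_solution := by
  unfold Claim_unchanged_solution
  intro number k _ hpre
  unfold Spec_solution
  intro hD
  simp only [solution, solution_alt]
  by_cases h1 : number.toList.length = 1
  · simp [h1]
  · rw [if_neg h1, if_neg h1]
    by_cases hk0 : k ≤ 0
    · rw [if_pos hk0, aOuter_nonpos _ _ _ hk0]
      by_cases hk00 : k = 0
      · subst hk00
        rw [aFinish_zero]
        simp [String.ofList_toList]
      · rw [aFinish_eq, if_pos hk00]
        rw [PySem.List.slice_to _ (by simp; omega)]
        simp [String.ofList_toList]
    · rw [if_neg hk0]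
      by_cases hkn : k ≤ (number.toList.length : Int)
      · have hkk : (k.toNat : Int) = k := Int.toNat_of_nonneg (by omega)
        have hm := mainA k.toNat number.toList (by omega)
        rw [hkk] at hm
        show String.ofList (outT (aOuter number.toList [] k))
          = String.ofList (iterRm number.toList k)
        rw [hm]
      · push_neg at hkn
        have hne : number.toList ≠ [] := toList_ne_nil number (hpre.resolve_right hk0)
        have hsm : (smc number.toList : Int) ≤ k - number.toList.length := by
          unfold D_solution at hD
          have h2 := not_and.mp hD hkn
          omega
        show String.ofList (outT (aOuter number.toList [] k))
          = String.ofList (iterRm number.toList k)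
        rw [outA_big _ k hkn]
        rw [iterRm_all number.toList.length number.toList k le_rfl (by omega)]
        have hlen : (fsA number.toList []).length = smc number.toList := fsA_smc_nil _
        have h0 : (fsA number.toList []).length - (k - (number.toList.length : Int)).toNat = 0 := by
          omega
        rw [h0, List.take_zero]
theorem solution_changed : Claim_changed_solution := by
  unfold Claim_changed_solution
  refine ⟨by decide, by decide, by decide, ?_, ?_, by decide⟩
  · show solution "21" 3 = "2"
    simp [solution, aOuter, aFinish, PySem.List.slice]
  · show solution_alt "21" 3 = ""
    simp [solution_alt, iterRm, rmB]
theorem solution_tight : Claim_exact_solution := by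
  unfold Claim_exact_solution
  intro number k _ hpre hD
  unfold D_solution at hD
  obtain ⟨hk1, hk2⟩ := hD
  have hsmle := smc_le_len number.toList
  have h1 : number.toList.length ≠ 1 := by omega
  simp only [solution, solution_alt, if_neg h1]
  rw [if_neg (show ¬ k ≤ 0 by omega)]
  show String.ofList (outT (aOuter number.toList [] k))
    ≠ String.ofList (iterRm number.toList k)
  rw [outA_big _ k (by omega), iterRm_all number.toList.length number.toList k le_rfl (by omega)]
  intro hEq
  have hTL := congrArg String.toList hEq
  rw [String.toList_ofList, String.toList_ofList] at hTL
  have hFlen := fsA_smc_nil number.toList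
  rcases List.take_eq_nil_iff.mp hTL with h | h <;>
    first
      | omega
      | (have hlen0 := congrArg List.length h
         simp only [List.length_reverse, List.length_nil] at hlen0
         omega)
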